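-- pv_equiv track=rewrite | github.com/sumitk87549/Train_POC | books_downloader.py | choose_gutendex_format
-- ===== SOURCE A (Python) =====
-- from typing import Optional, Dict, Tuple
--
-- DEFAULT_FORMAT_PRIORITY = ["application/epub+zip", "application/pdf", "text/plain; charset=utf-8", "text/plain"]
--
-- def choose_gutendex_format(book_entry: dict) -> Optional[Tuple[str,str]]:
--     fmts = book_entry.get("formats", {})
--     # prefer epub, then pdf, then text
--     for pref in DEFAULT_FORMAT_PRIORITY:
--         for key, url in fmts.items():
--             if key and key.lower().startswith(pref.split(";")[0].lower()):
--                 return key, url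
--     # fallback: pick any http link
--     for k, v in fmts.items():
--         if isinstance(v, str) and v.startswith("http"):
--             return k, v
--     return None
-- ===== SOURCE B (Python) =====
-- from typing import Optional, Tuple
--
-- DEFAULT_FORMAT_PRIORITY = ["application/epub+zip", "application/pdf", "text/plain; charset=utf-8", "text/plain"]
--
-- def choose_gutendex_format(book_entry: dict) -> Optional[Tuple[str, str]]:
--     fmts = book_entry.get("formats", {})
--     prefixes = [p.split(";")[0].lower() for p in DEFAULT_FORMAT_PRIORITY]
--     best = None  # (rank, key, url); strict '<' keeps the first dict-order entry on ties
--     for key, url in fmts.items():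
--         if not key:
--             continue
--         low = key.lower()
--         rank = next((i for i, p in enumerate(prefixes) if low.startswith(p)), None)
--         if rank is None:
--             continue
--         if best is None or rank < best[0]:
--             best = (rank, key, url)
--     if best is not None:
--         return best[1], best[2]
--     for k, v in fmts.items():
--         if isinstance(v, str) and v.startswith("http"):
--             return k, v
--     return None
-- ===== Notes on version B (the rewrite author's own statement) =====
-- stated objective: alternative
-- what changed: Replaces A's nested scans (one pass over the formats dict per priority entry) with a single pass over the formats that looks up each key's priority rank in a precomputed lowercased-prefix list and keeps the strictly-smallest-rank, first-seen entry; the http fallback loop is unchanged.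
import Mathlib
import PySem

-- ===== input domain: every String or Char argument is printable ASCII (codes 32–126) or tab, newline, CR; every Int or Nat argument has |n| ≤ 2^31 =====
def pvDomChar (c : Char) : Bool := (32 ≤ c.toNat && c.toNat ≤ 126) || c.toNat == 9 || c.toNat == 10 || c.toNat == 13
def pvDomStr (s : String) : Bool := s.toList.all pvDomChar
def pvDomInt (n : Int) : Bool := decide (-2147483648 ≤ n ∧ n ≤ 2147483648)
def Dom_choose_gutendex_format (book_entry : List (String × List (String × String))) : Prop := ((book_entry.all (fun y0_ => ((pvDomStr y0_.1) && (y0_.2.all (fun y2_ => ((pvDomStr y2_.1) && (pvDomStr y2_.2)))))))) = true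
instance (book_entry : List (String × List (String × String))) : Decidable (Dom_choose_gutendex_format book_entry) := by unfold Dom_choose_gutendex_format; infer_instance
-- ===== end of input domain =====

-- B replaces A's P×N nested priority scans by one pass over the formats with a precomputed
-- prefix list and a strict min-rank accumulator (objective: alternative decomposition, same cost).

def pvPriority : List String :=
  ["application/epub+zip", "application/pdf", "text/plain; charset=utf-8", "text/plain"]

-- pref.split(";")[0].lower()  (split? with sep ";" is never none; split result is never empty,
-- so getD/headD defaults are unreachable — exact)
def pvPrefOf (pref : String) : String :=
  PySem.Str.lower (((PySem.Str.split? pref ";").getD []).headD "")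

-- ===== PORT A =====
-- inner loop: for key, url in fmts.items(): if key and key.lower().startswith(pref.split(";")[0].lower()): return key, url
def pvFindMatch (pref : String) : List (String × String) → Option (String × String)
  | [] => none
  | (k, u) :: t =>
      if k ≠ "" && PySem.Str.startswith (PySem.Str.lower k) (pvPrefOf pref) then some (k, u)
      else pvFindMatch pref t

-- outer loop: for pref in DEFAULT_FORMAT_PRIORITY
def pvLoopPrefs : List String → List (String × String) → Option (String × String)
  | [], _ => none
  | p :: ps, fmts =>
      match pvFindMatch p fmts with
      | some r => some r
      | none => pvLoopPrefs ps fmts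

-- fallback loop: for k, v in fmts.items(): if isinstance(v, str) and v.startswith("http"): return k, v
-- (isinstance(v, str) is always true under the typed domain)
def pvFallback : List (String × String) → Option (String × String)
  | [] => none
  | (k, v) :: t => if PySem.Str.startswith v "http" then some (k, v) else pvFallback t

def choose_gutendex_format (book_entry : List (String × List (String × String))) : Option (String × String) :=
  let fmts := PySem.Dict.getD ⟨book_entry⟩ "formats" []
  match pvLoopPrefs pvPriority fmts with
  | some r => some r
  | none => pvFallback fmts

-- ===== PORT B =====
-- prefixes = [p.split(";")[0].lower() for p in DEFAULT_FORMAT_PRIORITY]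
def pvPrefixes : List String := pvPriority.map pvPrefOf

-- rank = next((i for i, p in enumerate(prefixes) if low.startswith(p)), None)
def pvRank (key : String) : Option Nat :=
  pvPrefixes.findIdx? (fun p => PySem.Str.startswith (PySem.Str.lower key) p)

-- the single pass: best = (rank, key, url), updated only on strictly smaller rank
def pvBestLoop : List (String × String) → Option (Nat × String × String) → Option (Nat × String × String)
  | [], best => best
  | (k, u) :: t, best =>
      if k = "" then pvBestLoop t best
      else
        match pvRank k with
        | none => pvBestLoop t best
        | some r =>
            match best with
            | none => pvBestLoop t (some (r, k, u))
            | some (br, _, _) =>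
                if r < br then pvBestLoop t (some (r, k, u)) else pvBestLoop t best

def choose_gutendex_format_alt (book_entry : List (String × List (String × String))) : Option (String × String) :=
  let fmts := PySem.Dict.getD ⟨book_entry⟩ "formats" []
  match pvBestLoop fmts none with
  | some (_, k, u) => some (k, u)
  | none => pvFallback fmts

-- ===== PRECONDITION & SPEC =====
def Spec_choose_gutendex_format (book_entry : List (String × List (String × String))) (out : Option (String × String)) : Prop := out = choose_gutendex_format_alt book_entry
instance (book_entry : List (String × List (String × String))) (out : Option (String × String)) : Decidable (Spec_choose_gutendex_format book_entry out) := by unfold Spec_choose_gutendex_format; infer_instance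

-- ===== CLAIM (what is proved, stated in full; the proofs are below) =====
def Claim_equal_choose_gutendex_format : Prop := ∀ (book_entry : List (String × List (String × String))), Dom_choose_gutendex_format book_entry → Spec_choose_gutendex_format book_entry (choose_gutendex_format book_entry)

-- ===== LEMMAS AND PROOFS =====

-- generalized A-side loop over arbitrary key predicates
def pvLoopG : List (String → Bool) → List (String × String) → Option (String × String)
  | [], _ => none
  | q :: qs, fmts =>
      match fmts.find? (fun kv => q kv.1) with
      | some kv => some kv
      | none => pvLoopG qs fmts

-- generalized B-side loop over an arbitrary rank function
def pvGloop (r : String → Option Nat) : List (String × String) → Option (Nat × String × String) → Option (Nat × String × String)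
  | [], b => b
  | (k, u) :: t, b =>
      match r k with
      | none => pvGloop r t b
      | some i =>
          match b with
          | none => pvGloop r t (some (i, k, u))
          | some (j, _, _) =>
              if i < j then pvGloop r t (some (i, k, u)) else pvGloop r t b

def pvPred (pref : String) (k : String) : Bool :=
  k ≠ "" && PySem.Str.startswith (PySem.Str.lower k) (pvPrefOf pref)

def pvR (qs : List (String → Bool)) (k : String) : Option Nat :=
  qs.findIdx? (fun q => q k)

theorem pvFindMatch_eq_find? (p : String) (fmts : List (String × String)) :
    pvFindMatch p fmts = fmts.find? (fun kv => pvPred p kv.1) := by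
  induction fmts with
  | nil => rfl
  | cons kv t ih =>
      obtain ⟨k, u⟩ := kv
      have hc : (fun kv : String × String => pvPred p kv.1) (k, u) = pvPred p k := rfl
      by_cases h : pvPred p k = true
      · rw [List.find?_cons_of_pos (p := fun kv : String × String => pvPred p kv.1) (a := (k, u)) (l := t) (hc.trans h)]
        show (if pvPred p k = true then some (k, u) else pvFindMatch p t) = some (k, u)
        rw [if_pos h]
      · rw [List.find?_cons_of_neg (p := fun kv : String × String => pvPred p kv.1) (a := (k, u)) (l := t) (fun hh => h (hc.symm.trans hh))]
        show (if pvPred p k = true then some (k, u) else pvFindMatch p t) = _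
        rw [if_neg h, ih]

theorem pvLoopPrefs_eq_loopG (ps : List String) (fmts : List (String × String)) :
    pvLoopPrefs ps fmts = pvLoopG (ps.map pvPred) fmts := by
  induction ps with
  | nil => rfl
  | cons p ps ih =>
      simp only [pvLoopPrefs, List.map, pvLoopG, pvFindMatch_eq_find?, ih]

theorem pvBestLoop_eq_gloop (fmts : List (String × String)) (b : Option (Nat × String × String)) :
    pvBestLoop fmts b = pvGloop (fun k => if k = "" then none else pvRank k) fmts b := by
  induction fmts generalizing b with
  | nil => rfl
  | cons kv t ih =>
      obtain ⟨k, u⟩ := kv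
      by_cases h : k = ""
      · simp [pvBestLoop, pvGloop, h, ih]
      · simp only [pvBestLoop, pvGloop, if_neg h]
        cases hr : pvRank k with
        | none => exact ih b
        | some r =>
            cases b with
            | none => exact ih _
            | some x =>
                obtain ⟨br, k2, u2⟩ := x
                dsimp only
                split_ifs <;> exact ih _

theorem pvRank_eq_R (k : String) :
    (if k = "" then none else pvRank k) = pvR (pvPriority.map pvPred) k := by
  by_cases h : k = ""
  · simp [h, pvR, pvPriority, pvPred, List.findIdx?_cons, List.findIdx?_nil]
  · simp [h, pvR, pvRank, pvPrefixes, pvPriority, pvPred, List.findIdx?_cons, List.findIdx?_nil]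

theorem pvGloop_congr (r r' : String → Option Nat) (h : ∀ k, r k = r' k)
    (fmts : List (String × String)) (b : Option (Nat × String × String)) :
    pvGloop r fmts b = pvGloop r' fmts b := by
  have : r = r' := funext h
  rw [this]

theorem pvGloop_none (r : String → Option Nat) (fmts : List (String × String))
    (b : Option (Nat × String × String)) (h : ∀ kv ∈ fmts, r kv.1 = none) :
    pvGloop r fmts b = b := by
  induction fmts generalizing b with
  | nil => rfl
  | cons kv t ih =>
      obtain ⟨k, u⟩ := kv
      have hk : r k = none := h (k, u) (by simp)
      simp only [pvGloop, hk]
      exact ih b (fun kv hkv => h kv (by simp [hkv]))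

-- once the accumulator holds rank 0, it never changes
theorem pvGloop_zero_absorb (r : String → Option Nat) (fmts : List (String × String))
    (k : String) (u : String) :
    pvGloop r fmts (some (0, k, u)) = some (0, k, u) := by
  induction fmts with
  | nil => rfl
  | cons kv t ih =>
      obtain ⟨k', u'⟩ := kv
      simp only [pvGloop]
      cases hr : r k' with
      | none => exact ih
      | some i => simp [ih]

-- if some entry has rank 0, the loop returns the first such entry
theorem pvGloop_first_zero (r : String → Option Nat) (fmts : List (String × String))
    (k u : String) (b : Option (Nat × String × String))
    (hb : ∀ j k' u', b = some (j, k', u') → 0 < j)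
    (hf : fmts.find? (fun kv => r kv.1 == some 0) = some (k, u)) :
    pvGloop r fmts b = some (0, k, u) := by
  induction fmts generalizing b with
  | nil => simp at hf
  | cons kv t ih =>
      obtain ⟨k', u'⟩ := kv
      by_cases h0 : r k' = some 0
      · rw [List.find?_cons_of_pos (by simp [h0])] at hf
        simp only [Option.some.injEq, Prod.mk.injEq] at hf
        obtain ⟨rfl, rfl⟩ := hf
        cases b with
        | none =>
            simp only [pvGloop, h0]
            exact pvGloop_zero_absorb r t k' u'
        | some x =>
            obtain ⟨j, k2, u2⟩ := x
            have hj : 0 < j := hb j k2 u2 rfl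
            simp only [pvGloop, h0]
            rw [if_pos hj]
            exact pvGloop_zero_absorb r t k' u'
      · rw [List.find?_cons_of_neg (by simp [h0])] at hf
        cases hr : r k' with
        | none =>
            simp only [pvGloop, hr]
            exact ih b hb hf
        | some i =>
            have hi : 0 < i := by
              rcases Nat.eq_zero_or_pos i with h | h
              · exact absurd (by rw [hr, h]) h0
              · exact h
            cases b with
            | none =>
                simp only [pvGloop, hr]
                refine ih _ ?_ hf
                intro j k2 u2 hj
                simp only [Option.some.injEq, Prod.mk.injEq] at hj
                omega
            | some x =>
                obtain ⟨j, k2, u2⟩ := x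
                simp only [pvGloop, hr]
                split_ifs with hij
                · refine ih _ ?_ hf
                  intro j' k3 u3 hj'
                  simp only [Option.some.injEq, Prod.mk.injEq] at hj'
                  omega
                · exact ih _ hb hf

-- shifting every rank by +1 shifts the result by +1
theorem pvGloop_shift (r r' : String → Option Nat) (fmts : List (String × String))
    (b : Option (Nat × String × String))
    (h : ∀ kv ∈ fmts, r kv.1 = (r' kv.1).map (· + 1)) :
    pvGloop r fmts (b.map (fun x => (x.1 + 1, x.2))) =
      (pvGloop r' fmts b).map (fun x => (x.1 + 1, x.2)) := by
  induction fmts generalizing b with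
  | nil => rfl
  | cons kv t ih =>
      obtain ⟨k, u⟩ := kv
      have hk : r k = (r' k).map (· + 1) := h (k, u) (by simp)
      have ht : ∀ kv ∈ t, r kv.1 = (r' kv.1).map (· + 1) := fun kv hkv => h kv (by simp [hkv])
      simp only [pvGloop, hk]
      cases hr : r' k with
      | none => simp [ih _ ht]
      | some i =>
          cases b with
          | none =>
              simpa using ih (some (i, k, u)) ht
          | some x =>
              obtain ⟨j, k2, u2⟩ := x
              simp only [Option.map_some]
              by_cases hij : i < j
              · simp only [if_pos hij, if_pos (by omega : i + 1 < j + 1)]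
                simpa using ih (some (i, k, u)) ht
              · simp only [if_neg hij, if_neg (by omega : ¬ i + 1 < j + 1)]
                simpa using ih (some (j, k2, u2)) ht
      
theorem pvFind?_congr {α : Type} (p q : α → Bool) (l : List α)
    (h : ∀ a ∈ l, p a = q a) : l.find? p = l.find? q := by
  induction l with
  | nil => rfl
  | cons a t ih =>
      have ha : p a = q a := h a (by simp)
      cases hq : q a with
      | true => rw [List.find?_cons_of_pos (ha.trans hq), List.find?_cons_of_pos hq]
      | false =>
          rw [List.find?_cons_of_neg (by simp [ha, hq]), List.find?_cons_of_neg (by simp [hq])]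
          exact ih (fun a ha => h a (by simp [ha]))

-- main correspondence: the nested priority scan equals the projected min-rank pass
theorem pvLoopG_eq_gloop (qs : List (String → Bool)) (fmts : List (String × String)) :
    pvLoopG qs fmts = (pvGloop (pvR qs) fmts none).map (fun x => x.2) := by
  induction qs generalizing fmts with
  | nil =>
      have : pvGloop (pvR []) fmts none = none :=
        pvGloop_none _ _ _ (fun kv _ => by simp [pvR])
      simp [pvLoopG, this]
  | cons q qs ih =>
      have hR : ∀ k, pvR (q :: qs) k = if q k then some 0 else (pvR qs k).map (· + 1) := by
        intro k; simp [pvR, List.findIdx?_cons]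
      simp only [pvLoopG]
      cases hf : fmts.find? (fun kv => q kv.1) with
      | some kv =>
          obtain ⟨k, u⟩ := kv
          have hf' : fmts.find? (fun kv => pvR (q :: qs) kv.1 == some 0) = some (k, u) := by
            rw [← hf]; apply pvFind?_congr
            intro kv _; simp only [hR]
            by_cases hq : q kv.1 <;> simp [hq]
          rw [pvGloop_first_zero (pvR (q :: qs)) fmts k u none (by simp) hf']
          rfl
      | none =>
          have hnq : ∀ kv ∈ fmts, ¬ (q kv.1 = true) := by
            intro kv hkv
            have := List.find?_eq_none.mp hf kv hkv
            simpa using this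
          have hsh : ∀ kv ∈ fmts, pvR (q :: qs) kv.1 = (pvR qs kv.1).map (· + 1) := by
            intro kv hkv
            rw [hR]
            simp [Bool.eq_false_iff.mpr (hnq kv hkv) ]
          have := pvGloop_shift (pvR (q :: qs)) (pvR qs) fmts none hsh
          simp only [Option.map_none] at this
          rw [this, ih]
          cases pvGloop (pvR qs) fmts none <;> rfl

theorem pvMain (fmts : List (String × String)) :
    pvLoopPrefs pvPriority fmts = (pvBestLoop fmts none).map (fun x => x.2) := by
  rw [pvLoopPrefs_eq_loopG, pvBestLoop_eq_gloop, pvLoopG_eq_gloop,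
      pvGloop_congr _ _ pvRank_eq_R]

theorem pvTop (fmts : List (String × String)) :
    (match pvLoopPrefs pvPriority fmts with
     | some r => some r
     | none => pvFallback fmts)
    = (match pvBestLoop fmts none with
       | some (_, k, u) => some (k, u)
       | none => pvFallback fmts) := by
  rw [pvMain]
  cases pvBestLoop fmts none with
  | none => rfl
  | some x => obtain ⟨i, k, u⟩ := x; rfl

-- ===== VERDICT (by name: the statement is the Claim_ definition above) =====
theorem choose_gutendex_format_spec : Claim_equal_choose_gutendex_format := by
  intro book_entry _
  unfold Spec_choose_gutendex_format choose_gutendex_format choose_gutendex_format_alt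
  exact pvTop _
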